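-- pv_equiv track=rewrite | github.com/flohero/se-ppr | e01/e01.py | decode_walk
-- ===== SOURCE A (Python) =====
-- def decode_walk(walk: list) -> tuple[int, int]:
--     """
--     Decodes a walk into a vector
--     :param walk: list containing only the values N, E, S, W
--     :return: a vector (x, y)
--     """
--     if not walk:
--         raise ValueError("walk can not be empty")
--     options_with_value = {"N": (0, 1), "E": (1, 0), "S": (0, -1), "W": (-1, 0)}
--     dx = 0
--     dy = 0
--     for direction in walk:
--         if direction not in options_with_value:
--             raise ValueError("Invalid direction")
--         x, y = options_with_value[direction]
--         dx += x
--         dy += y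
--     return dx, dy
-- ===== SOURCE B (Python) =====
-- def decode_walk(walk: list) -> tuple[int, int]:
--     if not walk:
--         raise ValueError("walk can not be empty")
--     counts = {}
--     for d in walk:
--         counts[d] = counts.get(d, 0) + 1
--     if any(k not in ("N", "E", "S", "W") for k in counts):
--         raise ValueError("Invalid direction")
--     return (counts.get("E", 0) - counts.get("W", 0),
--             counts.get("N", 0) - counts.get("S", 0))
-- ===== Notes on version B (the rewrite author's own statement) =====
-- stated objective: alternative
-- what changed: B tallies the walk into a frequency dict in one pass and returns the closed-form (E-W, N-S) from the four tallies, instead of A's per-step vector accumulation via a direction->vector dict.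
import Mathlib
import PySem

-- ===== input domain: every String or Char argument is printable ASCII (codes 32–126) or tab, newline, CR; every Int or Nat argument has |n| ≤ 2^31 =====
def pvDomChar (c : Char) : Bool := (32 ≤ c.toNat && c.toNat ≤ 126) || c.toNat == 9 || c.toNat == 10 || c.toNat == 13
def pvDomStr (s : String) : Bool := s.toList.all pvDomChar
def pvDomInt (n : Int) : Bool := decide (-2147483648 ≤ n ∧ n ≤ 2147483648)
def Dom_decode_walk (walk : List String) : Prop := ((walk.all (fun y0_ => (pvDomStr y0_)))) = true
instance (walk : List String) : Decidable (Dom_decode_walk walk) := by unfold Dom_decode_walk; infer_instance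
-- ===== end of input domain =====

-- B tallies the walk into a frequency dict and returns the closed-form (E-W, N-S); same raises as A.

-- ===== PORT A =====
def decode_walk (walk : List String) : Int × Int :=
  let options_with_value : PySem.Dict String (Int × Int) :=
    ((((PySem.Dict.empty).insert "N" ((0 : Int), (1 : Int))).insert "E" (1, 0)).insert "S" (0, -1)).insert "W" (-1, 0)
  -- the 'direction not in options_with_value' branch raises in Python; Pre_ excludes it, lookup defaults
  walk.foldl (fun st direction =>
    let xy := options_with_value.getD direction (0, 0)
    (st.1 + xy.1, st.2 + xy.2)) (0, 0)

-- ===== PORT B =====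
def decode_walk_alt (walk : List String) : Int × Int :=
  let counts : PySem.Dict String Int :=
    walk.foldl (fun c d => c.insert d (c.getD d 0 + 1)) PySem.Dict.empty
  -- the empty-walk and invalid-key raises of Source B are excluded by Pre_
  (counts.getD "E" 0 - counts.getD "W" 0, counts.getD "N" 0 - counts.getD "S" 0)

-- ===== PRECONDITION & SPEC =====
-- Pre_ excludes exactly the inputs on which A (and B) raise ValueError: the empty walk and any element outside {"N","E","S","W"}.
def Pre_decode_walk (walk : List String) : Prop :=
  walk ≠ [] ∧ ∀ s ∈ walk, s = "N" ∨ s = "E" ∨ s = "S" ∨ s = "W"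
instance (walk : List String) : Decidable (Pre_decode_walk walk) := by unfold Pre_decode_walk; infer_instance
def pvWitness_decode_walk : List String := ["N", "E", "N", "W", "S"]

def Spec_decode_walk (walk : List String) (out : Int × Int) : Prop := out = decode_walk_alt walk
instance (walk : List String) (out : Int × Int) : Decidable (Spec_decode_walk walk out) := by unfold Spec_decode_walk; infer_instance

-- ===== CLAIM (what is proved, stated in full; the proofs are below) =====
def Claim_equal_decode_walk : Prop := ∀ (walk : List String), Dom_decode_walk walk → Pre_decode_walk walk → Spec_decode_walk walk (decode_walk walk)

-- ===== LEMMAS AND PROOFS =====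

-- A's accumulation equals the closed form in the four counts, for any start accumulator.
theorem decode_walk_foldl_counts (walk : List String)
    (h : ∀ s ∈ walk, s = "N" ∨ s = "E" ∨ s = "S" ∨ s = "W") :
    ∀ a b : Int,
      walk.foldl (fun st direction =>
        let xy := (((((PySem.Dict.empty).insert "N" ((0 : Int), (1 : Int))).insert "E" (1, 0)).insert "S" (0, -1)).insert "W" (-1, 0) : PySem.Dict String (Int × Int)).getD direction (0, 0)
        (st.1 + xy.1, st.2 + xy.2)) (a, b)
      = (a + (walk.count "E" : Int) - (walk.count "W" : Int),
         b + (walk.count "N" : Int) - (walk.count "S" : Int)) := by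
  induction walk with
  | nil => simp
  | cons d ws ih =>
    intro a b
    have hd := h d (List.mem_cons_self ..)
    have hws : ∀ s ∈ ws, s = "N" ∨ s = "E" ∨ s = "S" ∨ s = "W" :=
      fun s hs => h s (List.mem_cons_of_mem _ hs)
    rcases hd with rfl | rfl | rfl | rfl <;>
      simp only [List.foldl_cons,
        show ((((((PySem.Dict.empty).insert "N" ((0 : Int), (1 : Int))).insert "E" (1, 0)).insert "S" (0, -1)).insert "W" (-1, 0) : PySem.Dict String (Int × Int))).getD "N" (0, 0) = ((0 : Int), (1 : Int)) from by decide,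
        show ((((((PySem.Dict.empty).insert "N" ((0 : Int), (1 : Int))).insert "E" (1, 0)).insert "S" (0, -1)).insert "W" (-1, 0) : PySem.Dict String (Int × Int))).getD "E" (0, 0) = ((1 : Int), (0 : Int)) from by decide,
        show ((((((PySem.Dict.empty).insert "N" ((0 : Int), (1 : Int))).insert "E" (1, 0)).insert "S" (0, -1)).insert "W" (-1, 0) : PySem.Dict String (Int × Int))).getD "S" (0, 0) = ((0 : Int), (-1 : Int)) from by decide,
        show ((((((PySem.Dict.empty).insert "N" ((0 : Int), (1 : Int))).insert "E" (1, 0)).insert "S" (0, -1)).insert "W" (-1, 0) : PySem.Dict String (Int × Int))).getD "W" (0, 0) = ((-1 : Int), (0 : Int)) from by decide] <;>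
      simp [ih hws, Prod.ext_iff] <;> omega

theorem decode_walk_spec_aux (walk : List String) (hpre : Pre_decode_walk walk) :
    decode_walk walk = decode_walk_alt walk := by
  obtain ⟨-, hall⟩ := hpre
  show decode_walk walk = decode_walk_alt walk
  unfold decode_walk decode_walk_alt
  rw [decode_walk_foldl_counts walk hall 0 0]
  rw [PySem.Dict.foldl_insert_getD_add_one_eq_counter]
  simp [PySem.Dict.getD_counter]

-- ===== VERDICT (by name: the statement is the Claim_ definition above) =====
theorem decode_walk_spec : Claim_equal_decode_walk := by
  intro walk _ hpre
  exact decode_walk_spec_aux walk hpre
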